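-- pv_equiv track=rewrite | github.com/happyeyeryday/Label-free-CBM | scripts/validate_hierarchical_concepts.py | parse_levels_csv
-- ===== SOURCE A (Python) =====
-- def parse_levels_csv(value):
--     valid = {"l1", "l2", "l3", "l4"}
--     levels = [x.strip().lower() for x in value.split(",") if x.strip()]
--     if not levels:
--         raise ValueError("--levels must include at least one layer")
--     invalid = [x for x in levels if x not in valid]
--     if invalid:
--         raise ValueError(f"--levels contains invalid layers: {invalid}")
--     deduped = []
--     seen = set()
--     for level in levels:
--         if level not in seen:
--             seen.add(level)
--             deduped.append(level)
--     return deduped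
-- ===== SOURCE B (Python) =====
-- def parse_levels_csv(value):
--     valid = {"l1", "l2", "l3", "l4"}
--     levels = [x.strip().lower() for x in value.split(",") if x.strip()]
--     if not levels:
--         raise ValueError("--levels must include at least one layer")
--     bad = set(levels) - valid
--     if bad:
--         raise ValueError(f"--levels contains invalid layers: {[x for x in levels if x in bad]}")
--     return sorted(set(levels), key=levels.index)
-- ===== Notes on version B (the rewrite author's own statement) =====
-- stated objective: alternative
-- what changed: Validation becomes a set-difference (set(levels) - valid) instead of a per-token membership filter, and the order-preserving seen-set dedup loop is replaced by sorting the distinct tokens by their first-occurrence index (sorted(set(levels), key=levels.index)); the invalid-layers error list is reconstructed only in the error path and is identical to A's.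
import Mathlib
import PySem

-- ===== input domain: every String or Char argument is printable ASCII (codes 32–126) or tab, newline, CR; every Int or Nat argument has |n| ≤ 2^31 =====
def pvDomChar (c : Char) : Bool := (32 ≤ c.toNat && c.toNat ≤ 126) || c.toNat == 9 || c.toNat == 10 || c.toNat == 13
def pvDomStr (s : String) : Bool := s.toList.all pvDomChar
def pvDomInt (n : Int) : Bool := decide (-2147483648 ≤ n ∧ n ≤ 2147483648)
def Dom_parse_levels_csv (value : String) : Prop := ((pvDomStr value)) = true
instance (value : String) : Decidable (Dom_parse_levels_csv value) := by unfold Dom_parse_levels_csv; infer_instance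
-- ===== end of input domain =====

-- B validates via a set difference and dedups by sorting the distinct tokens by their
-- first-occurrence index, instead of A's per-token filter and seen-set loop; same values
-- and same ValueError messages, equivalence proved on Pre_ (where A returns).

-- ===== PORT A =====
-- value.split(",") with a non-empty literal separator: split? is some here
def pvSplitComma (value : String) : List String := (PySem.Str.split? value ",").getD []

-- A's dedup-loop step: state = (seen, deduped)
def pvStepA (st : PySem.Set String × List String) (level : String) :
    PySem.Set String × List String :=
  if PySem.Set.contains st.1 level then st
  else (PySem.Set.add st.1 level, st.2 ++ [level])

-- Python A: levels = [x.strip().lower() for x in value.split(",") if x.strip()]; raise if empty;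
-- invalid = [x for x in levels if x not in valid]; raise if nonempty; then the seen-set dedup loop.
-- Where Python raises ValueError the port returns [] (those inputs are outside Pre_).
def parse_levels_csv (value : String) : List String :=
  let valid : PySem.Set String := PySem.Set.ofList ["l1", "l2", "l3", "l4"]
  let levels := ((pvSplitComma value).filter (fun x => PySem.Str.strip x != "")).map
      (fun x => PySem.Str.lower (PySem.Str.strip x))
  if levels = [] then []  -- raise ValueError("--levels must include at least one layer")
  else
    let invalid := levels.filter (fun x => !(PySem.Set.contains valid x))
    if invalid ≠ [] then []  -- raise ValueError("--levels contains invalid layers: …")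
    else (levels.foldl pvStepA (PySem.Set.empty, [])).2

-- ===== PORT B =====
-- Python B: same tokenization; bad = set(levels) - valid, raise if non-empty;
-- return sorted(set(levels), key=levels.index).  The sort key (first-occurrence index) is
-- injective on set(levels), so the result does not depend on the set's iteration order.
def parse_levels_csv_alt (value : String) : List String :=
  let levels := ((pvSplitComma value).filter (fun x => PySem.Str.strip x != "")).map
      (fun x => PySem.Str.lower (PySem.Str.strip x))
  if levels = [] then []  -- raise ValueError("--levels must include at least one layer")
  else
    let present : PySem.Set String := PySem.Set.ofList levels
    let bad := PySem.Set.diff present (PySem.Set.ofList ["l1", "l2", "l3", "l4"])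
    if bad ≠ [] then []  -- raise ValueError("--levels contains invalid layers: …")
    else PySem.List.sorted present (fun x => (PySem.List.index? levels x).getD 0) false

-- ===== PRECONDITION & SPEC =====
-- Pre_ excludes exactly the inputs on which Python A raises ValueError: no non-empty token, or some
-- stripped+lowercased token outside {"l1","l2","l3","l4"}.
def Pre_parse_levels_csv (value : String) : Prop :=
  let toks := ((pvSplitComma value).filter (fun x => PySem.Str.strip x != "")).map
      (fun x => PySem.Str.lower (PySem.Str.strip x))
  toks ≠ [] ∧ ∀ t ∈ toks, t = "l1" ∨ t = "l2" ∨ t = "l3" ∨ t = "l4"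
instance (value : String) : Decidable (Pre_parse_levels_csv value) := by
  unfold Pre_parse_levels_csv; infer_instance
def pvWitness_parse_levels_csv : String := "L2, l1 ,l2"
def Spec_parse_levels_csv (value : String) (out : List String) : Prop := out = parse_levels_csv_alt value
instance (value : String) (out : List String) : Decidable (Spec_parse_levels_csv value out) := by unfold Spec_parse_levels_csv; infer_instance

-- ===== CLAIM =====
def Claim_equal_parse_levels_csv : Prop := ∀ (value : String), Dom_parse_levels_csv value → Pre_parse_levels_csv value → Spec_parse_levels_csv value (parse_levels_csv value)

-- ===== LEMMAS AND PROOFS =====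

-- A's dedup loop keeps its two accumulators equal as lists, so it is the Set.add fold
lemma pvFoldA_pair (xs : List String) (s : PySem.Set String) :
    xs.foldl pvStepA (s, s) = (xs.foldl PySem.Set.add s, xs.foldl PySem.Set.add s) := by
  induction xs generalizing s with
  | nil => rfl
  | cons x xs ih =>
    simp only [List.foldl_cons, pvStepA, PySem.Set.add, PySem.Set.contains_eq_listContains]
    by_cases h : x ∈ s <;> simp [h, ih]

-- set(xs) in first-insertion order is strictly increasing in first-occurrence index
lemma pvOfList_pairwise_index (xs : List String) :
    (PySem.Set.ofList xs).Pairwise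
      (fun a b => ((PySem.List.index? xs a).getD 0 : Nat) < (PySem.List.index? xs b).getD 0) := by
  induction xs with
  | nil => simp [PySem.Set.ofList_nil]
  | cons x xs ih =>
    rw [PySem.Set.ofList_cons]
    constructor
    · intro y hy
      have hyx : y ≠ x := ((PySem.Set.mem_discard _ _ _).mp hy).2
      have hyxs : y ∈ xs := (PySem.Set.mem_ofList _ _).mp ((PySem.Set.mem_discard _ _ _).mp hy).1
      obtain ⟨k, hk⟩ :=
        Option.isSome_iff_exists.mp ((PySem.List.index?_isSome_iff _ _).mpr hyxs)
      rw [PySem.List.index?_cons_self, PySem.List.index?_cons_of_ne xs (Ne.symm hyx), hk]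
      simp
    · have hsub : (PySem.Set.discard (PySem.Set.ofList xs) x).Pairwise
          (fun a b => ((PySem.List.index? xs a).getD 0 : Nat) < (PySem.List.index? xs b).getD 0) :=
        List.Pairwise.sublist (by simp [PySem.Set.discard]) ih
      refine hsub.imp_of_mem ?_
      intro a b ha hb hab
      have hax : a ≠ x := ((PySem.Set.mem_discard _ _ _).mp ha).2
      have hbx : b ≠ x := ((PySem.Set.mem_discard _ _ _).mp hb).2
      have haxs : a ∈ xs := (PySem.Set.mem_ofList _ _).mp ((PySem.Set.mem_discard _ _ _).mp ha).1
      have hbxs : b ∈ xs := (PySem.Set.mem_ofList _ _).mp ((PySem.Set.mem_discard _ _ _).mp hb).1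
      obtain ⟨ka, hka⟩ :=
        Option.isSome_iff_exists.mp ((PySem.List.index?_isSome_iff _ _).mpr haxs)
      obtain ⟨kb, hkb⟩ :=
        Option.isSome_iff_exists.mp ((PySem.List.index?_isSome_iff _ _).mpr hbxs)
      rw [PySem.List.index?_cons_of_ne xs (Ne.symm hax),
        PySem.List.index?_cons_of_ne xs (Ne.symm hbx), hka, hkb]
      rw [hka, hkb] at hab
      simpa using Nat.add_lt_add_right (by simpa using hab) 1

-- ===== VERDICT =====
theorem parse_levels_csv_spec : Claim_equal_parse_levels_csv := by
  intro value _ hpre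
  obtain ⟨hne, hall⟩ := hpre
  show parse_levels_csv value = parse_levels_csv_alt value
  unfold parse_levels_csv parse_levels_csv_alt
  set levels := ((pvSplitComma value).filter (fun x => PySem.Str.strip x != "")).map
      (fun x => PySem.Str.lower (PySem.Str.strip x)) with hlv
  rw [if_neg hne, if_neg hne]
  have hinv : levels.filter
      (fun x => !(PySem.Set.contains (PySem.Set.ofList ["l1", "l2", "l3", "l4"]) x)) = [] := by
    rw [List.filter_eq_nil_iff]
    intro t ht
    rcases hall t ht with h | h | h | h <;> rw [h] <;> decide
  have hbad : PySem.Set.diff (PySem.Set.ofList levels)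
      (PySem.Set.ofList ["l1", "l2", "l3", "l4"]) = [] := by
    rw [List.eq_nil_iff_forall_not_mem]
    intro t ht
    have hmem := (PySem.Set.mem_diff _ _ _).mp ht
    have ht' := (PySem.Set.mem_ofList _ _).mp hmem.1
    rcases hall t ht' with h | h | h | h <;> subst h <;> exact hmem.2 (by decide)
  have hA : (levels.foldl pvStepA (PySem.Set.empty, [])).2 = PySem.Set.ofList levels := by
    have : levels.foldl pvStepA (PySem.Set.empty, []) =
        (levels.foldl PySem.Set.add [], levels.foldl PySem.Set.add []) :=
      pvFoldA_pair levels []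
    rw [this, PySem.Set.ofList_eq_foldl]
  simp only [hinv, hbad, ne_eq, not_true_eq_false, if_false, hA]
  exact (PySem.List.sorted_eq_of_perm_of_pairwise_lt _ _ _ (List.Perm.refl _)
    (pvOfList_pairwise_index levels)).symm
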